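-- pv_equiv track=rewrite | github.com/BrianMills2718/qc | qc/core/better_global_analyzer.py | _select_relevant_sections
-- ===== SOURCE A (Python) =====
-- from typing import List, Dict, Optional, Tuple, Any
--
-- def _select_relevant_sections(sections: List[str], theme_name: str, theme_desc: str) -> List[str]:
--     """Select sections most likely to contain relevant quotes."""
--     if not sections:
--         return []
--
--     # Simple scoring based on keyword presence
--     keywords = theme_name.lower().replace("_", " ").split()
--     keywords.extend(theme_desc.lower().split()[:5])
--
--     scored_sections = []
--     for section in sections:
--         section_lower = section.lower()
--         score = sum(1 for kw in keywords if kw in section_lower)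
--         scored_sections.append((score, section))
--
--     # Sort by relevance and return top sections
--     scored_sections.sort(key=lambda x: x[0], reverse=True)
--     return [section for score, section in scored_sections[:5] if score > 0]
-- ===== SOURCE B (Python) =====
-- def _select_relevant_sections(sections, theme_name, theme_desc):
--     """Select sections most likely to contain relevant quotes (bucket-by-score version)."""
--     keywords = theme_name.lower().replace("_", " ").split()
--     keywords.extend(theme_desc.lower().split()[:5])
--
--     # One pass: bucket each section under its score, tracking the maximum score.
--     buckets = {}
--     max_score = 0
--     for section in sections:
--         section_lower = section.lower()
--         score = sum(1 for kw in keywords if kw in section_lower)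
--         buckets.setdefault(score, []).append(section)
--         if max_score < score:
--             max_score = score
--
--     # Concatenate buckets from the highest score down to 1 (never score 0), top 5.
--     result = []
--     for sc in range(max_score, 0, -1):
--         result.extend(buckets.get(sc, []))
--     return result[:5]
-- ===== Notes on version B (the rewrite author's own statement) =====
-- stated objective: alternative
-- what changed: Replaced the stable sort of all (score, section) pairs followed by slice-top-5-and-drop-zeros with a single scoring pass that buckets sections by score in a dict while tracking the maximum score, then concatenates buckets from the maximum score down to 1 and takes the first 5.
import Mathlib
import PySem

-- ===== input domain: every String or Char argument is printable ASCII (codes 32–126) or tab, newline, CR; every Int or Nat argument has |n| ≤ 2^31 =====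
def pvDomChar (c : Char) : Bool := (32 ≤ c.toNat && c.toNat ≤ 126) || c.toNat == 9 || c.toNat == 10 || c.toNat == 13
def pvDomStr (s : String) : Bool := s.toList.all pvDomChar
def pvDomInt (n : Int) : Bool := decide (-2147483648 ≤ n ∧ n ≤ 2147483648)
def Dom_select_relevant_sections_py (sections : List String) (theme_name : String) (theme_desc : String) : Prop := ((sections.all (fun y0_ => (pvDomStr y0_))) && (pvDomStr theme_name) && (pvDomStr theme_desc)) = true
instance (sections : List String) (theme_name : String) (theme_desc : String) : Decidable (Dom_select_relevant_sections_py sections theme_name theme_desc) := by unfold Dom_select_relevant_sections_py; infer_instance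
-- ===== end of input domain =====

-- B replaces the stable sort + slice-top-5-and-drop-zeros selection by a one-pass dict bucketing
-- by score plus a max-score countdown concatenation (objective: alternative; same return value).

-- B replaces the stable sort + slice-top-5-and-drop-zeros selection by a one-pass dict bucketing
-- by score plus a max-score countdown concatenation (objective: alternative; same return value).

-- ===== PORT A =====
-- shared helper lines (identical lines of Python in A and B): keyword list and keyword-count score
def pvKeywords (theme_name : String) (theme_desc : String) : List String :=
  PySem.Str.split₀ (PySem.Str.replace (PySem.Str.lower theme_name) "_" " ") ++
    PySem.List.slice (PySem.Str.split₀ (PySem.Str.lower theme_desc)) none (some 5)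

def pvScore (keywords : List String) (sec : String) : Int :=
  let section_lower := PySem.Str.lower sec
  keywords.foldl (fun n kw => if PySem.Str.isIn kw section_lower then n + 1 else n) 0

def select_relevant_sections_py (sections : List String) (theme_name : String) (theme_desc : String) : List String :=
  if sections = [] then []
  else
    let keywords := pvKeywords theme_name theme_desc
    let scored_sections : List (Int × String) :=
      sections.foldl (fun acc sec => acc ++ [(pvScore keywords sec, sec)]) []
    let sorted_sections := PySem.List.sorted scored_sections (fun x => x.1) true
    ((PySem.List.slice sorted_sections none (some 5)).filter (fun p => decide (0 < p.1))).map (fun p => p.2)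

-- ===== PORT B =====
def select_relevant_sections_py_alt (sections : List String) (theme_name : String) (theme_desc : String) : List String :=
  let keywords := pvKeywords theme_name theme_desc
  let st : PySem.Dict Int (List String) × Int :=
    sections.foldl
      (fun acc sec =>
        let score := pvScore keywords sec
        (acc.1.modify score [] (· ++ [sec]), if acc.2 < score then score else acc.2))
      (PySem.Dict.empty, 0)
  let result := (PySem.List.pyRange st.2 0 (-1)).foldl (fun acc sc => acc ++ st.1.getD sc []) []
  PySem.List.slice result none (some 5)

-- ===== PRECONDITION & SPEC =====
def Spec_select_relevant_sections_py (sections : List String) (theme_name : String) (theme_desc : String) (out : List String) : Prop := out = select_relevant_sections_py_alt sections theme_name theme_desc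
instance (sections : List String) (theme_name : String) (theme_desc : String) (out : List String) : Decidable (Spec_select_relevant_sections_py sections theme_name theme_desc out) := by unfold Spec_select_relevant_sections_py; infer_instance

-- ===== CLAIM (what is proved, stated in full; the proofs are below) =====
def Claim_equal_select_relevant_sections_py : Prop := ∀ (sections : List String) (theme_name : String) (theme_desc : String), Dom_select_relevant_sections_py sections theme_name theme_desc → Spec_select_relevant_sections_py sections theme_name theme_desc (select_relevant_sections_py sections theme_name theme_desc)

-- ===== LEMMAS AND PROOFS =====


lemma pv_filter_insertBy_of_ne {α : Type} (key : α → Int) (x : α) (k : Int)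
    (hx : (key x == k) = false) (ys : List α) :
    (PySem.List.insertBy (fun a b => decide (key b < key a)) x ys).filter (fun a => key a == k)
      = ys.filter (fun a => key a == k) := by
  induction ys with
  | nil => simp [PySem.List.insertBy, hx]
  | cons y t ih =>
    rw [PySem.List.insertBy]
    split_ifs with h
    · simp [hx]
    · simp only [List.filter_cons]
      rw [ih]

lemma pv_filter_insertBy_self {α : Type} (key : α → Int) (x : α) (k : Int)
    (hx : (key x == k) = true) (ys : List α)
    (hys : ys.Pairwise (fun a b => key b ≤ key a)) :
    (PySem.List.insertBy (fun a b => decide (key b < key a)) x ys).filter (fun a => key a == k)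
      = ys.filter (fun a => key a == k) ++ [x] := by
  have hk : key x = k := by simpa using hx
  induction ys with
  | nil => simp [PySem.List.insertBy, hx]
  | cons y t ih =>
    rw [PySem.List.insertBy]
    rcases List.pairwise_cons.mp hys with ⟨hy, ht⟩
    split_ifs with h
    · -- key y < key x; all of y :: t below k, filter = []
      have hlt : key y < key x := by simpa using h
      have : (y :: t).filter (fun a => key a == k) = [] := by
        rw [List.filter_eq_nil_iff]
        intro a ha
        have : key a ≤ key y := by
          rcases List.mem_cons.mp ha with rfl | ha
          · exact le_refl _
          · exact hy a ha
        simp only [beq_iff_eq]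
        omega
      rw [List.filter_cons_of_pos (by simpa using hx)]
      simp [this]
    · simp only [List.filter_cons]
      rw [ih ht]
      split <;> simp


lemma pv_filter_sorted_rev {α : Type} (key : α → Int) (xs : List α) (k : Int) :
    (PySem.List.sorted xs key true).filter (fun a => key a == k)
      = xs.filter (fun a => key a == k) := by
  induction xs using List.reverseRecOn with
  | nil => rfl
  | append_singleton l x ih =>
    rw [PySem.List.sorted_rev_eq_foldl_insertBy, List.foldl_append, List.foldl_cons, List.foldl_nil,
        ← PySem.List.sorted_rev_eq_foldl_insertBy]
    by_cases hx : (key x == k) = true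
    · rw [pv_filter_insertBy_self key x k hx _ (PySem.List.sorted_pairwise_rev l key), ih, List.filter_append]
      simp [hx]
    · rw [pv_filter_insertBy_of_ne key x k (by simpa using hx) _, ih, List.filter_append]
      simp [hx]

lemma pv_eq_of_pairwise_desc_of_filter_eq {α : Type} (key : α → Int) :
    ∀ (l1 l2 : List α), l1.Pairwise (fun a b => key b ≤ key a) →
      l2.Pairwise (fun a b => key b ≤ key a) →
      (∀ k, l1.filter (fun a => key a == k) = l2.filter (fun a => key a == k)) → l1 = l2 := by
  intro l1
  induction l1 with
  | nil =>
    intro l2 _ _ hf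
    cases l2 with
    | nil => rfl
    | cons b t2 =>
      have := hf (key b)
      simp at this
  | cons a t1 ih =>
    intro l2 h1 h2 hf
    cases l2 with
    | nil =>
      have := hf (key a)
      simp at this
    | cons b t2 =>
      rcases List.pairwise_cons.mp h1 with ⟨ha, ht1⟩
      rcases List.pairwise_cons.mp h2 with ⟨hb, ht2⟩
      -- key a = key b
      have hab : key a = key b := by
        have hA : a ∈ List.filter (fun x => key x == key a) (b :: t2) := by
          rw [← hf (key a)]
          simp [List.mem_filter]
        have hB : b ∈ List.filter (fun x => key x == key b) (a :: t1) := by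
          rw [hf (key b)]
          simp [List.mem_filter]
        have h3 : key a ≤ key b := by
          rcases List.mem_cons.mp (List.mem_filter.mp hA).1 with rfl | hc
          · exact le_refl _
          · exact hb a hc
        have h4 : key b ≤ key a := by
          rcases List.mem_cons.mp (List.mem_filter.mp hB).1 with rfl | hc
          · exact le_refl _
          · exact ha b hc
        omega
      have hfa := hf (key a)
      rw [List.filter_cons_of_pos (by simp), List.filter_cons_of_pos (by simp [hab.symm])] at hfa
      have hba : a = b := by exact (List.cons.injEq _ _ _ _ ▸ hfa).1
      have htf : ∀ k, t1.filter (fun x => key x == k) = t2.filter (fun x => key x == k) := by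
        intro k
        by_cases hk : k = key a
        · subst hk
          exact (List.cons.injEq _ _ _ _ ▸ hfa).2
        · have := hf k
          rw [List.filter_cons_of_neg (by simp; omega), List.filter_cons_of_neg (by simp; omega)] at this
          exact this
      rw [hba, ih t2 ht1 ht2 htf]


def pvBuckets {α : Type} (key : α → Int) (xs : List α) (m : Int) : List α :=
  (PySem.List.pyRange m (-1) (-1)).flatMap (fun sc => xs.filter (fun a => key a == sc))

lemma pv_mem_buckets {α : Type} (key : α → Int) (xs : List α) (m : Int) (a : α)
    (h : a ∈ pvBuckets key xs m) : -1 < key a ∧ key a ≤ m ∧ a ∈ xs := by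
  rcases List.mem_flatMap.mp h with ⟨sc, hsc, ha⟩
  rcases PySem.List.mem_pyRange_neg_one.mp hsc with ⟨h1, h2⟩
  rcases List.mem_filter.mp ha with ⟨hax, hk⟩
  have : key a = sc := by simpa using hk
  exact ⟨by omega, by omega, hax⟩

lemma pv_buckets_spec {α : Type} (key : α → Int) :
    ∀ (n : Nat) (m : Int) (xs : List α), m + 1 = (n : Int) →
      (∀ a ∈ xs, 0 ≤ key a ∧ key a ≤ m) →
      (pvBuckets key xs m).Pairwise (fun a b => key b ≤ key a) ∧
      (∀ k, (pvBuckets key xs m).filter (fun a => key a == k) = xs.filter (fun a => key a == k)) := by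
  intro n
  induction n with
  | zero =>
    intro m xs hm hb
    have hxs : xs = [] := by
      cases xs with
      | nil => rfl
      | cons a t => exact absurd (hb a List.mem_cons_self) (by omega)
    subst hxs
    have : pvBuckets key ([] : List α) m = [] := by
      simp [pvBuckets]
    rw [this]
    simp
  | succ n ih =>
    intro m xs hm hb
    have hm0 : 0 ≤ m := by omega
    have hcons : PySem.List.pyRange m (-1) (-1) = m :: PySem.List.pyRange (m-1) (-1) (-1) :=
      PySem.List.pyRange_neg_one_cons (by omega)
    set xs' := xs.filter (fun a => !(key a == m)) with hxs'
    have hcongr : ∀ sc ∈ PySem.List.pyRange (m-1) (-1) (-1),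
        xs.filter (fun a => key a == sc) = xs'.filter (fun a => key a == sc) := by
      intro sc hsc
      rcases PySem.List.mem_pyRange_neg_one.mp hsc with ⟨h1, h2⟩
      rw [hxs', List.filter_filter]
      apply List.filter_congr
      intro a _
      by_cases h : key a = sc
      · simp [h]; omega
      · simp [h]
    have htail : (PySem.List.pyRange (m-1) (-1) (-1)).flatMap (fun sc => xs.filter (fun a => key a == sc))
        = pvBuckets key xs' (m-1) := by
      unfold pvBuckets
      exact List.flatMap_congr hcongr
    have hb' : ∀ a ∈ xs', 0 ≤ key a ∧ key a ≤ m - 1 := by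
      intro a ha
      rcases List.mem_filter.mp ha with ⟨hax, hne⟩
      have := hb a hax
      have hne' : key a ≠ m := by simpa using hne
      omega
    rcases ih (m-1) xs' (by omega) hb' with ⟨ihP, ihF⟩
    have hsplit : pvBuckets key xs m = xs.filter (fun a => key a == m) ++ pvBuckets key xs' (m-1) := by
      conv_lhs => rw [pvBuckets, hcons]
      rw [List.flatMap_cons, htail]
    constructor
    · rw [hsplit]
      rw [List.pairwise_append]
      refine ⟨?_, ihP, ?_⟩
      · -- within bucket m: all keys equal m
        have : ∀ a ∈ xs.filter (fun a => key a == m), key a = m := by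
          intro a ha
          simpa using (List.mem_filter.mp ha).2
        apply List.Pairwise.imp_of_mem (R := fun a b => key a = m ∧ key b = m)
        · intro a b hab
          omega
        · apply List.pairwise_of_forall_mem_list
          intro a ha b hb2
          exact ⟨this a ha, this b hb2⟩
      · intro a ha b hbm
        have h1 : key a = m := by simpa using (List.mem_filter.mp ha).2
        have h2 := pv_mem_buckets key xs' (m-1) b hbm
        omega
    · intro k
      rw [hsplit, List.filter_append, ihF k, hxs']
      by_cases hk : k = m
      · subst hk
        have e2 : List.filter (fun a => key a == k) (List.filter (fun a => !(key a == k)) xs) = [] := by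
          rw [List.filter_eq_nil_iff]
          intro a ha
          have h2 := (List.mem_filter.mp ha).2
          simp at h2 ⊢
          exact h2
        have e1 : List.filter (fun a => key a == k) (List.filter (fun a => key a == k) xs)
            = List.filter (fun a => key a == k) xs := by
          rw [List.filter_filter]
          apply List.filter_congr
          intro a _
          by_cases h : key a = k <;> simp [h]
        rw [e1, e2, List.append_nil]
      · have e1 : List.filter (fun a => key a == k) (List.filter (fun a => key a == m) xs) = [] := by
          rw [List.filter_eq_nil_iff]
          intro a ha
          have h2 := (List.mem_filter.mp ha).2
          simp at h2 ⊢
          omega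
        have e2 : List.filter (fun a => key a == k) (List.filter (fun a => !(key a == m)) xs)
            = List.filter (fun a => key a == k) xs := by
          rw [List.filter_filter]
          apply List.filter_congr
          intro a _
          by_cases h : key a = k <;> simp [h]
          omega
        rw [e1, e2, List.nil_append]


-- Python's stable descending-by-key sort is the bucket concatenation, max key down to 0.
lemma pv_sorted_eq_buckets {α : Type} (key : α → Int) (xs : List α) (m : Int)
    (hm : 0 ≤ m) (hb : ∀ a ∈ xs, 0 ≤ key a ∧ key a ≤ m) :
    PySem.List.sorted xs key true = pvBuckets key xs m := by
  rcases pv_buckets_spec key (m+1).toNat m xs (by omega) hb with ⟨hP, hF⟩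
  refine pv_eq_of_pairwise_desc_of_filter_eq key _ _ (PySem.List.sorted_pairwise_rev xs key) hP ?_
  intro k
  rw [pv_filter_sorted_rev, hF k]

-- range(m, -1, -1) = range(m, 0, -1) ++ [0]
lemma pv_range_split (m : Int) (hm : 0 ≤ m) :
    PySem.List.pyRange m (-1) (-1) = PySem.List.pyRange m 0 (-1) ++ [0] := by
  rw [PySem.List.pyRange_neg_one_eq_reverse, PySem.List.pyRange_neg_one_eq_reverse]
  rw [show (-1 : Int) + 1 = 0 from rfl, show (0 : Int) + 1 = 1 from rfl]
  rw [PySem.List.pyRange_one_append 0 1 (m+1) (by omega) (by omega)]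
  rw [List.reverse_append]
  congr 1

-- top-5 of positives ++ zeros, then dropping zeros, is top-5 of the positives
lemma pv_take_filter_pos (P Z : List (Int × String))
    (hP : ∀ p ∈ P, 0 < p.1) (hZ : ∀ p ∈ Z, p.1 = 0) :
    ((P ++ Z).take 5).filter (fun p => decide (0 < p.1)) = P.take 5 := by
  rw [List.take_append, List.filter_append]
  rw [List.filter_eq_self.mpr, List.filter_eq_nil_iff.mpr, List.append_nil]
  · intro p hp
    have := hZ p (List.take_subset _ _ hp)
    simp
    omega
  · intro p hp
    have := hP p (List.take_subset _ _ hp)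
    simpa using this

-- the score is a count, hence nonnegative
lemma pv_score_nonneg (kws : List String) (s : String) : 0 ≤ pvScore kws s := by
  unfold pvScore
  rw [PySem.List.foldl_if_add_one]
  positivity

-- A's selection, written as take/filter/map of the stable sort of the scored list
lemma pv_A_eq (sections : List String) (theme_name theme_desc : String) (hs : sections ≠ []) :
    select_relevant_sections_py sections theme_name theme_desc
      = (((PySem.List.sorted
            (sections.map (fun s => (pvScore (pvKeywords theme_name theme_desc) s, s)))
            (fun x => x.1) true).take 5).filter
          (fun p => decide (0 < p.1))).map (fun p => p.2) := by
  unfold select_relevant_sections_py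
  rw [if_neg hs]
  dsimp only
  rw [PySem.List.foldl_append_singleton_eq_map
        (f := fun sec => (pvScore (pvKeywords theme_name theme_desc) sec, sec)), List.nil_append]
  rw [PySem.List.slice_to _ (by norm_num)]
  rfl

-- B's selection, written as take of the map-snd of the bucket concatenation
lemma pv_B_eq (sections : List String) (theme_name theme_desc : String) :
    select_relevant_sections_py_alt sections theme_name theme_desc
      = (((PySem.List.pyRange
              (sections.foldl (fun m s => max m (pvScore (pvKeywords theme_name theme_desc) s)) 0)
              0 (-1)).flatMap
            (fun sc => (sections.map (fun s => (pvScore (pvKeywords theme_name theme_desc) s, s))).filter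
              (fun p => p.1 == sc))).map (fun p => p.2)).take 5 := by
  unfold select_relevant_sections_py_alt
  dsimp only
  rw [PySem.List.foldl_prod_mk
        (f := fun (d : PySem.Dict Int (List String)) sec =>
          d.modify (pvScore (pvKeywords theme_name theme_desc) sec) [] (· ++ [sec]))
        (g := fun (m : Int) sec =>
          if m < pvScore (pvKeywords theme_name theme_desc) sec
          then pvScore (pvKeywords theme_name theme_desc) sec else m)]
  dsimp only
  have hgm : sections.foldl
        (fun (m : Int) sec => if m < pvScore (pvKeywords theme_name theme_desc) sec
          then pvScore (pvKeywords theme_name theme_desc) sec else m) 0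
      = sections.foldl (fun m s => max m (pvScore (pvKeywords theme_name theme_desc) s)) 0 := by
    apply PySem.List.foldl_congr_mem
    intro acc x _
    rcases lt_or_ge acc (pvScore (pvKeywords theme_name theme_desc) x) with h | h
    · rw [if_pos h, max_eq_right h.le]
    · rw [if_neg (not_lt.mpr h), max_eq_left h]
  have hd : ∀ sc : Int,
      (sections.foldl (fun (d : PySem.Dict Int (List String)) sec =>
        d.modify (pvScore (pvKeywords theme_name theme_desc) sec) [] (· ++ [sec])) PySem.Dict.empty).getD sc []
      = ((sections.map (fun s => (pvScore (pvKeywords theme_name theme_desc) s, s))).filter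
          (fun p => p.1 == sc)).map (fun p => p.2) := by
    intro sc
    rw [show sections.foldl (fun (d : PySem.Dict Int (List String)) sec =>
          d.modify (pvScore (pvKeywords theme_name theme_desc) sec) [] (· ++ [sec])) PySem.Dict.empty
        = (sections.map (fun s => (pvScore (pvKeywords theme_name theme_desc) s, s))).foldl
            (fun d p => d.modify p.1 [] (· ++ [p.2])) PySem.Dict.empty from by rw [List.foldl_map]]
    rw [PySem.Dict.getD_foldl_modify_append]
    rfl
  rw [hgm]
  rw [PySem.List.foldl_append_eq_flatMap, List.nil_append]
  rw [List.flatMap_congr (fun sc _ => hd sc)]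
  rw [List.map_flatMap]
  rw [PySem.List.slice_to _ (by norm_num)]
  rfl

-- the core equality, for an arbitrary nonnegative scoring function
lemma pv_core (sections : List String) (f : String → Int) (hpos : ∀ s, 0 ≤ f s) :
    (((PySem.List.sorted (sections.map (fun s => (f s, s))) (fun x => x.1) true).take 5).filter
        (fun p => decide (0 < p.1))).map (fun p => p.2)
      = (((PySem.List.pyRange (sections.foldl (fun m s => max m (f s)) 0) 0 (-1)).flatMap
            (fun sc => (sections.map (fun s => (f s, s))).filter (fun p => p.1 == sc))).map
          (fun p => p.2)).take 5 := by
  have hmax := PySem.List.le_foldl_max_int sections f 0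
  have hb : ∀ p ∈ sections.map (fun s => (f s, s)),
      0 ≤ p.1 ∧ p.1 ≤ sections.foldl (fun m s => max m (f s)) 0 := by
    intro p hp
    rcases List.mem_map.mp hp with ⟨s, hsmem, rfl⟩
    exact ⟨hpos s, hmax.2 s hsmem⟩
  rw [pv_sorted_eq_buckets (fun p : Int × String => p.1) _ _ hmax.1 hb]
  rw [pvBuckets, pv_range_split _ hmax.1, List.flatMap_append]
  rw [show (([(0 : Int)].flatMap fun sc =>
        (sections.map (fun s => (f s, s))).filter (fun a => a.1 == sc)))
      = (sections.map (fun s => (f s, s))).filter (fun a => a.1 == 0) from by simp]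
  rw [pv_take_filter_pos _ _ ?hp ?hz]
  · rw [List.map_take]
  case hp =>
    intro p hp
    rcases List.mem_flatMap.mp hp with ⟨sc, hsc, hpf⟩
    rcases PySem.List.mem_pyRange_neg_one.mp hsc with ⟨h1, _⟩
    have : p.1 = sc := by simpa using (List.mem_filter.mp hpf).2
    omega
  case hz =>
    intro p hp
    simpa using (List.mem_filter.mp hp).2

-- ===== VERDICT (by name: the statement is the Claim_ definition above) =====
theorem select_relevant_sections_py_spec : Claim_equal_select_relevant_sections_py := by
  intro sections theme_name theme_desc _
  unfold Spec_select_relevant_sections_py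
  by_cases hs : sections = []
  · subst hs
    simp [select_relevant_sections_py, select_relevant_sections_py_alt,
      PySem.List.pyRange_neg_one_eq_nil, PySem.List.slice_to]
  · rw [pv_A_eq sections theme_name theme_desc hs, pv_B_eq sections theme_name theme_desc,
        pv_core sections (pvScore (pvKeywords theme_name theme_desc))
          (fun s => pv_score_nonneg (pvKeywords theme_name theme_desc) s)]
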